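-- pv_equiv track=rewrite | github.com/tsuru7/algorithm-study | AtCoder/ABC237/C.py | solve
-- ===== SOURCE A (Python) =====
-- def solve(s):
--     n = len(s)
--     t = s[::-1]
--     if s == t:
--         return 'Yes'
--
--     tail_a = 0
--     for i in range(n):
--         if t[i] == 'a':
--             tail_a += 1
--         else:
--             break
--     head_a = 0
--     for i in range(n):
--         if s[i] == 'a':
--             head_a += 1
--         else:
--             break
--     if head_a >= tail_a:
--         return 'No'
--
--     add_a = 'a'*(tail_a - head_a)
--     s = add_a + s
--     t = t + add_a
--     if s == t:
--         return 'Yes'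
--     else:
--         return 'No'
-- ===== SOURCE B (Python) =====
-- def solve(s):
--     while True:
--         if s == s[::-1]:
--             return 'Yes'
--         if s.endswith('a'):
--             s = s[:-1]
--         else:
--             return 'No'
-- ===== Notes on version B (the rewrite author's own statement) =====
-- stated objective: alternative
-- what changed: Replaces A's one-shot computation (count leading/trailing 'a's, pad once, compare) with an iterative search: repeatedly test whether the current string is a palindrome and otherwise peel one trailing 'a', answering No when peeling is impossible.
import Mathlib
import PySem

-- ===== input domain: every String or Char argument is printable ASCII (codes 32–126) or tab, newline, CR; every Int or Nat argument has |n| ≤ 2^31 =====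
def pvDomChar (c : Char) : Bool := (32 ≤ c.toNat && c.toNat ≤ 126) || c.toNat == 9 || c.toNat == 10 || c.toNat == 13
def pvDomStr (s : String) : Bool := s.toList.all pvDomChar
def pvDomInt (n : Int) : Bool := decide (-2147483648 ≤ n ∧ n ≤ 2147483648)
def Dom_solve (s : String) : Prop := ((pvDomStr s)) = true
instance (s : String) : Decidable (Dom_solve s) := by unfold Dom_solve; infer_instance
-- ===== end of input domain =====

-- B replaces A's one-shot count/pad/compare by an iterative search: test palindromicity,
-- otherwise peel one trailing 'a' and retry; answer No when no trailing 'a' remains.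

-- ===== PORT A =====
-- A's counting loop `for i in range(n): if x[i] == 'a': k += 1 else: break` on the char list
def countLeadA : List Char → Nat
  | [] => 0
  | c :: r => if c == 'a' then countLeadA r + 1 else 0

-- body of A on code points: s[::-1] is reversal, str '==' is code-point list equality,
-- str '+' is list append, 'a'*k is List.replicate
def solveList (cs : List Char) : String :=
  let t := cs.reverse
  if cs = t then "Yes"
  else
    let tail_a := countLeadA t
    let head_a := countLeadA cs
    if tail_a ≤ head_a then "No"
    else
      let add_a := List.replicate (tail_a - head_a) 'a'
      if add_a ++ cs = t ++ add_a then "Yes" else "No"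

def solve (s : String) : String := solveList s.toList

-- ===== PORT B =====
-- B's while-loop on code points: s == s[::-1] is reversal equality, s.endswith('a') is
-- 'last char is 'a'', s[:-1] is dropLast; the loop becomes recursion on the shrinking list
def solveAltList (cs : List Char) : String :=
  if h : cs = cs.reverse then "Yes"
  else if cs.getLast? = some 'a' then solveAltList cs.dropLast
  else "No"
termination_by cs.length
decreasing_by
  have hne : cs ≠ [] := fun hn => h (by simp [hn])
  have := List.length_pos_of_ne_nil hne
  simp [List.length_dropLast]; omega

def solve_alt (s : String) : String := solveAltList s.toList

-- ===== PRECONDITION & SPEC =====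
def Spec_solve (s : String) (out : String) : Prop := out = solve_alt s
instance (s : String) (out : String) : Decidable (Spec_solve s out) := by unfold Spec_solve; infer_instance

-- ===== CLAIM =====
def Claim_equal_solve : Prop := ∀ (s : String), Dom_solve s → Spec_solve s (solve s)

-- ===== LEMMAS AND PROOFS =====

lemma countLeadA_replicate_append (k : Nat) (u : List Char) :
    countLeadA (List.replicate k 'a' ++ u) = k + countLeadA u := by
  induction k with
  | zero => simp
  | succ n ih => simp [List.replicate_succ, countLeadA, ih]; omega

lemma countLeadA_cons_ne {c : Char} (hc : c ≠ 'a') (u : List Char) :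
    countLeadA (c :: u) = 0 := by
  simp [countLeadA, hc]

lemma countLeadA_decomp {core : List Char} {c : Char} {u : List Char}
    (hcu : core = c :: u) (hc : c ≠ 'a') (h t : Nat) :
    countLeadA (List.replicate h 'a' ++ core ++ List.replicate t 'a') = h := by
  rw [List.append_assoc, countLeadA_replicate_append, hcu, List.cons_append,
    countLeadA_cons_ne hc]
  omega

lemma reverse_decomp (h t : Nat) (core : List Char) :
    (List.replicate h 'a' ++ core ++ List.replicate t 'a').reverse
      = List.replicate t 'a' ++ core.reverse ++ List.replicate h 'a' := by
  simp [List.reverse_append, List.append_assoc]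

lemma pal_decomp_iff {core : List Char} {c d : Char} {u v : List Char}
    (hcu : core = c :: u) (hc : c ≠ 'a') (hdv : core.reverse = d :: v) (hd : d ≠ 'a')
    (h t : Nat) :
    (List.replicate h 'a' ++ core ++ List.replicate t 'a'
       = List.replicate t 'a' ++ core.reverse ++ List.replicate h 'a')
      ↔ (h = t ∧ core = core.reverse) := by
  constructor
  · intro he
    have hht : h = t := by
      have hl := countLeadA_decomp hcu hc h t
      have hr : countLeadA (List.replicate t 'a' ++ core.reverse ++ List.replicate h 'a') = t := by
        rw [List.append_assoc, countLeadA_replicate_append, hdv, List.cons_append,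
          countLeadA_cons_ne hd]
        omega
      rw [he, hr] at hl
      omega
    subst hht
    refine ⟨rfl, ?_⟩
    rw [List.append_assoc, List.append_assoc] at he
    exact List.append_cancel_right (List.append_cancel_left he)
  · rintro ⟨hht, hcp⟩
    subst hht
    rw [← hcp]

-- A on a decomposed input
lemma solveList_decomp {core : List Char} {c d : Char} {u v : List Char}
    (hcu : core = c :: u) (hc : c ≠ 'a') (hdv : core.reverse = d :: v) (hd : d ≠ 'a')
    (h t : Nat) :
    solveList (List.replicate h 'a' ++ core ++ List.replicate t 'a')
      = if core = core.reverse ∧ h ≤ t then "Yes" else "No" := by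
  simp only [solveList, reverse_decomp, countLeadA_decomp hcu hc, countLeadA_decomp hdv hd]
  have hPiff := pal_decomp_iff hcu hc hdv hd h t
  by_cases hP : List.replicate h 'a' ++ core ++ List.replicate t 'a'
      = List.replicate t 'a' ++ core.reverse ++ List.replicate h 'a'
  · rw [if_pos hP]
    rcases hPiff.mp hP with ⟨hht, hcp⟩
    rw [if_pos ⟨hcp, by omega⟩]
  · rw [if_neg hP]
    by_cases hth : t ≤ h
    · rw [if_pos hth, if_neg (by
        rintro ⟨hcp, hht⟩
        exact hP (hPiff.mpr ⟨by omega, hcp⟩))]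
    · rw [if_neg hth]
      have h1 : List.replicate (t - h) 'a' ++ List.replicate h 'a' = List.replicate t 'a' := by
        rw [← List.replicate_add]; congr 1; omega
      have h2 : List.replicate h 'a' ++ List.replicate (t - h) 'a' = List.replicate t 'a' := by
        rw [← List.replicate_add]; congr 1; omega
      have hQiff : (List.replicate (t - h) 'a' ++ (List.replicate h 'a' ++ core ++ List.replicate t 'a')
          = List.replicate t 'a' ++ core.reverse ++ List.replicate h 'a' ++ List.replicate (t - h) 'a')
          ↔ core = core.reverse := by
        constructor
        · intro he
          have he' : List.replicate t 'a' ++ core ++ List.replicate t 'a'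
              = List.replicate t 'a' ++ core.reverse ++ List.replicate t 'a' := by
            calc List.replicate t 'a' ++ core ++ List.replicate t 'a'
                = (List.replicate (t - h) 'a' ++ List.replicate h 'a') ++ core ++ List.replicate t 'a' := by
                  rw [h1]
              _ = List.replicate (t - h) 'a' ++ (List.replicate h 'a' ++ core ++ List.replicate t 'a') := by
                  simp only [List.append_assoc]
              _ = List.replicate t 'a' ++ core.reverse ++ List.replicate h 'a' ++ List.replicate (t - h) 'a' := he
              _ = List.replicate t 'a' ++ core.reverse ++ (List.replicate h 'a' ++ List.replicate (t - h) 'a') := by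
                  simp only [List.append_assoc]
              _ = List.replicate t 'a' ++ core.reverse ++ List.replicate t 'a' := by rw [h2]
          rw [List.append_assoc, List.append_assoc] at he'
          exact List.append_cancel_right (List.append_cancel_left he')
        · intro hcp
          calc List.replicate (t - h) 'a' ++ (List.replicate h 'a' ++ core ++ List.replicate t 'a')
              = (List.replicate (t - h) 'a' ++ List.replicate h 'a') ++ core ++ List.replicate t 'a' := by
                simp only [List.append_assoc]
            _ = List.replicate t 'a' ++ core ++ List.replicate t 'a' := by rw [h1]
            _ = List.replicate t 'a' ++ core.reverse ++ List.replicate t 'a' := by rw [← hcp]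
            _ = List.replicate t 'a' ++ core.reverse ++ List.replicate h 'a' ++ List.replicate (t - h) 'a' := by
                rw [← h2]; simp only [List.append_assoc]
      by_cases hcp : core = core.reverse
      · rw [if_pos (hQiff.mpr hcp), if_pos ⟨hcp, by omega⟩]
      · rw [if_neg (fun he => hcp (hQiff.mp he)), if_neg (fun hx => hcp hx.1)]

lemma getLast?_decomp_zero {core : List Char} {d : Char} {v : List Char}
    (hdv : core.reverse = d :: v) (h : Nat) :
    (List.replicate h 'a' ++ core ++ List.replicate 0 'a').getLast? = some d := by
  have hne : core ≠ [] := by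
    intro hn; rw [hn] at hdv; simp at hdv
  rw [List.replicate_zero, List.append_nil, List.getLast?_append_of_ne_nil _ hne,
    List.getLast?_eq_head?_reverse, hdv]
  rfl

lemma getLast?_decomp_succ (core : List Char) (h t : Nat) :
    (List.replicate h 'a' ++ core ++ List.replicate (t + 1) 'a').getLast? = some 'a' := by
  rw [List.getLast?_append_of_ne_nil _ (by simp), List.getLast?_eq_head?_reverse,
    List.reverse_replicate]
  simp [List.replicate_succ]

lemma dropLast_decomp_succ (core : List Char) (h t : Nat) :
    (List.replicate h 'a' ++ core ++ List.replicate (t + 1) 'a').dropLast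
      = List.replicate h 'a' ++ core ++ List.replicate t 'a' := by
  rw [List.append_assoc, List.append_assoc,
    List.dropLast_append_of_ne_nil (by simp)]
  congr 1
  rw [List.dropLast_append_of_ne_nil (by simp)]
  congr 1
  simp [List.dropLast_replicate]

-- B on a decomposed input
lemma solveAltList_decomp {core : List Char} {c d : Char} {u v : List Char}
    (hcu : core = c :: u) (hc : c ≠ 'a') (hdv : core.reverse = d :: v) (hd : d ≠ 'a')
    (h t : Nat) :
    solveAltList (List.replicate h 'a' ++ core ++ List.replicate t 'a')
      = if core = core.reverse ∧ h ≤ t then "Yes" else "No" := by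
  induction t with
  | zero =>
    rw [solveAltList]
    by_cases hP : List.replicate h 'a' ++ core ++ List.replicate 0 'a'
        = (List.replicate h 'a' ++ core ++ List.replicate 0 'a').reverse
    · rw [dif_pos hP]
      rw [reverse_decomp] at hP
      rcases (pal_decomp_iff hcu hc hdv hd h 0).mp hP with ⟨hh0, hcp⟩
      rw [if_pos ⟨hcp, by omega⟩]
    · rw [dif_neg hP, getLast?_decomp_zero hdv h, if_neg (by simp [hd]), if_neg]
      rintro ⟨hcp, hh0⟩
      exact hP (by rw [reverse_decomp]; exact (pal_decomp_iff hcu hc hdv hd h 0).mpr ⟨by omega, hcp⟩)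
  | succ n ih =>
    rw [solveAltList]
    by_cases hP : List.replicate h 'a' ++ core ++ List.replicate (n + 1) 'a'
        = (List.replicate h 'a' ++ core ++ List.replicate (n + 1) 'a').reverse
    · rw [dif_pos hP]
      rw [reverse_decomp] at hP
      rcases (pal_decomp_iff hcu hc hdv hd h (n + 1)).mp hP with ⟨hht, hcp⟩
      rw [if_pos ⟨hcp, by omega⟩]
    · rw [dif_neg hP, getLast?_decomp_succ, if_pos rfl, dropLast_decomp_succ, ih]
      have hne : ¬ (core = core.reverse ∧ h = n + 1) := by
        intro ⟨hcp, hht⟩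
        exact hP (by rw [reverse_decomp]; exact (pal_decomp_iff hcu hc hdv hd h (n + 1)).mpr ⟨hht, hcp⟩)
      by_cases hcp : core = core.reverse
      · by_cases hh : h ≤ n
        · rw [if_pos ⟨hcp, hh⟩, if_pos ⟨hcp, by omega⟩]
        · rw [if_neg (fun hx => hh hx.2), if_neg (by rintro ⟨_, hle⟩; exact hne ⟨hcp, by omega⟩)]
      · rw [if_neg (fun hx => hcp hx.1), if_neg (fun hx => hcp hx.1)]

-- decomposition of a list that is not all-'a' into  a^h ++ core ++ a^t  with core not touching 'a'
lemma decompA (l : List Char) (hd : l.dropWhile (· == 'a') ≠ []) :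
    ∃ (h t : Nat) (core : List Char),
      l = List.replicate h 'a' ++ core ++ List.replicate t 'a' ∧
      (∃ c u, core = c :: u ∧ c ≠ 'a') ∧
      (∃ c u, core.reverse = c :: u ∧ c ≠ 'a') := by
  set p : Char → Bool := (· == 'a') with hp
  set m : List Char := l.dropWhile p with hm
  have hl : l.takeWhile p ++ m = l := List.takeWhile_append_dropWhile
  have htw : l.takeWhile p = List.replicate (l.takeWhile p).length 'a' := by
    apply List.eq_replicate_of_mem
    intro b hb
    simpa [hp] using List.mem_takeWhile_imp hb
  obtain ⟨c0, u0, hm0⟩ := List.exists_cons_of_ne_nil hd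
  have hc0 : c0 ≠ 'a' := by
    have := List.head?_dropWhile_not p l
    rw [← hm, hm0] at this
    simpa [hp] using this
  set mr : List Char := m.reverse with hmr
  have hmrne : mr.dropWhile p ≠ [] := by
    intro hnil
    have hall : ∀ b ∈ mr, p b := by
      intro b hb
      have hmt : mr = mr.takeWhile p := by
        conv_lhs => rw [← List.takeWhile_append_dropWhile (p := p) (l := mr)]
        simp [hnil]
      rw [hmt] at hb
      exact List.mem_takeWhile_imp hb
    have hc0m : c0 ∈ mr := by
      rw [hmr, List.mem_reverse, hm0]; exact List.mem_cons_self ..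
    have := hall _ hc0m
    simp [hp, hc0] at this
  have hmrtw : mr.takeWhile p = List.replicate (mr.takeWhile p).length 'a' := by
    apply List.eq_replicate_of_mem
    intro b hb
    simpa [hp] using List.mem_takeWhile_imp hb
  have hmrtw' : (mr.takeWhile p).reverse = List.replicate (mr.takeWhile p).length 'a' := by
    conv_lhs => rw [hmrtw]
    rw [List.reverse_replicate]
  have hmm : m = (mr.dropWhile p).reverse ++ List.replicate (mr.takeWhile p).length 'a' := by
    have h1 : m = mr.reverse := by rw [hmr, List.reverse_reverse]
    conv_lhs => rw [h1, ← List.takeWhile_append_dropWhile (p := p) (l := mr)]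
    rw [List.reverse_append, hmrtw']
  obtain ⟨c, u, hcu⟩ := List.exists_cons_of_ne_nil hmrne
  have hcna : c ≠ 'a' := by
    have := List.head?_dropWhile_not p mr
    rw [hcu] at this
    simpa [hp] using this
  refine ⟨(l.takeWhile p).length, (mr.takeWhile p).length, (mr.dropWhile p).reverse, ?_, ?_, ?_⟩
  · calc l = l.takeWhile p ++ m := hl.symm
      _ = _ := by conv_lhs => rw [htw, hmm]; rw [← List.append_assoc]
  · have hcne : (mr.dropWhile p).reverse ≠ [] := by simp [hcu]
    obtain ⟨e, w, hew⟩ := List.exists_cons_of_ne_nil hcne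
    refine ⟨e, w, hew, ?_⟩
    intro hea
    have h1 : m.head? = some c0 := by rw [hm0]; rfl
    have h2 : m.head? = some e := by rw [hmm, hew]; rfl
    rw [h1] at h2
    exact hc0 (by rw [Option.some.inj h2, hea])
  · exact ⟨c, u, by simp [hcu], hcna⟩

-- the two bodies agree on every char list
lemma solveList_eq_alt (l : List Char) : solveList l = solveAltList l := by
  by_cases hd : l.dropWhile (· == 'a') = []
  · -- l is all 'a': both sides return "Yes" at once (l is its own reverse)
    have hl : l = List.replicate l.length 'a' := by
      apply List.eq_replicate_of_mem
      intro b hb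
      have hlt : l = l.takeWhile (· == 'a') := by
        conv_lhs => rw [← List.takeWhile_append_dropWhile (p := (· == 'a')) (l := l)]
        simp [hd]
      rw [hlt] at hb
      simpa using List.mem_takeWhile_imp hb
    have hrev : l.reverse = l := by conv_lhs => rw [hl, List.reverse_replicate, ← hl]
    rw [solveAltList]
    simp only [solveList, hrev]
    simp
  · obtain ⟨h, t, core, hdec, ⟨c, u, hcu, hc⟩, ⟨d, v, hdv, hdne⟩⟩ := decompA l hd
    rw [hdec, solveList_decomp hcu hc hdv hdne, solveAltList_decomp hcu hc hdv hdne]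

-- ===== VERDICT =====
theorem solve_spec : Claim_equal_solve := by
  intro s _
  unfold Spec_solve solve solve_alt
  exact solveList_eq_alt s.toList
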